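-- pv_equiv track=rewrite | github.com/alshwrbjyamer911/31jul25 | 5aug25/code/converter.py | save_as_c_array
-- ===== SOURCE A (Python) =====
-- def save_as_c_array(data, width, height, var_name="image_data"):
--     lines = []
--     lines.append(f"const uint16_t {var_name}[{width*height}] = {{")
--     # Format as hex values
--     for i in range(0, len(data), 12):
--         chunk = data[i:i+12]
--         hex_values = ", ".join(f"0x{val:04X}" for val in chunk)
--         lines.append("    " + hex_values + ",")
--     lines.append("};")
--     return "\n".join(lines)
-- ===== SOURCE B (Python) =====
-- def save_as_c_array(data, width, height, var_name="image_data"):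
--     out = f"const uint16_t {var_name}[{width*height}] = {{"
--     for i, v in enumerate(data):
--         if i == 0:
--             out += "\n    "
--         elif i % 12 == 0:
--             out += ",\n    "
--         else:
--             out += ", "
--         out += f"0x{v:04X}"
--     if data:
--         out += ","
--     return out + "\n};"
-- ===== Notes on version B (the rewrite author's own statement) =====
-- stated objective: alternative
-- what changed: B never builds a list of lines or slices the data: it streams the result in a single enumerate pass over the values, appending to one growing string and choosing the separator before each token from the index (first token, start of a 12-wide line, or within a line), with the trailing comma and footer appended at the end.
import Mathlib
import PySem

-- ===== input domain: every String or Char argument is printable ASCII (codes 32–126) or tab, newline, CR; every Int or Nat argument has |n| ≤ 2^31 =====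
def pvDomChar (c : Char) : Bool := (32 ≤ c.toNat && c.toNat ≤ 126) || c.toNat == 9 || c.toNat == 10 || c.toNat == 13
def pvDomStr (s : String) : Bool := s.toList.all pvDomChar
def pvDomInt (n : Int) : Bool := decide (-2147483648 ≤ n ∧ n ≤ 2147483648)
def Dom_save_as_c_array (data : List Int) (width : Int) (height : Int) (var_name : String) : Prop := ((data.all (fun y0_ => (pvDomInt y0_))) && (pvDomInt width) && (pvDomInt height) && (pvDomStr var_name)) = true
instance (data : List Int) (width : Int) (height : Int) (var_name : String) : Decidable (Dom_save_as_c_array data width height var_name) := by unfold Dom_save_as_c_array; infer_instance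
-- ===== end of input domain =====

-- B streams the output in one pass with an index-state machine (separator chosen from i % 12), never building a list of lines; alternative decomposition, same cost.


-- ===== PORT A =====
-- shared helper (used verbatim by both ports): port of the f-string `f"0x{val:04X}"`,
-- exact for every Int (uppercase hex digits, sign before the zero padding, total field width 4).
def hexDigitChar (n : Nat) : Char :=
  if n < 10 then Char.ofNat (48 + n) else Char.ofNat (55 + n)

def hexDigits (n : Nat) : List Char :=
  if _h : n < 16 then [hexDigitChar n]
  else hexDigits (n / 16) ++ [hexDigitChar (n % 16)]
decreasing_by exact Nat.div_lt_self (by omega) (by omega)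

def hexTok (v : Int) : String :=
  if v < 0 then
    let ds := hexDigits (-v).toNat
    "0x-" ++ String.ofList (List.replicate (3 - ds.length) '0') ++ String.ofList ds
  else
    let ds := hexDigits v.toNat
    "0x" ++ String.ofList (List.replicate (4 - ds.length) '0') ++ String.ofList ds

def save_as_c_array (data : List Int) (width : Int) (height : Int) (var_name : String) : String :=
  let lines : List String :=
    ["const uint16_t " ++ var_name ++ "[" ++ PySem.Int.toStr (width * height) ++ "] = {"]
  let lines := (PySem.List.pyRange 0 (data.length : Int) 12).foldl (fun lines i =>
    let chunk := PySem.List.slice data (some i) (some (i + 12))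
    let hex_values := PySem.Str.join ", " (chunk.map hexTok)
    lines ++ ["    " ++ hex_values ++ ","]) lines
  PySem.Str.join "\n" (lines ++ ["};"])

-- ===== PORT B =====
-- the `for i, v in enumerate(data):` streaming loop of Source B: one growing string,
-- separator before each token chosen from the index (first / start of a line of 12 / within a line)
def save_as_c_array_alt (data : List Int) (width : Int) (height : Int) (var_name : String) : String :=
  let out := "const uint16_t " ++ var_name ++ "[" ++ PySem.Int.toStr (width * height) ++ "] = {"
  let out := (PySem.List.enumerate data 0).foldl (fun out iv =>
    (if iv.1 == 0 then out ++ "\n    "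
     else if PySem.Int.mod iv.1 12 == 0 then out ++ ",\n    "
     else out ++ ", ") ++ hexTok iv.2) out
  let out := if data.isEmpty then out else out ++ ","
  out ++ "\n};"

-- ===== PRECONDITION & SPEC =====
def Spec_save_as_c_array (data : List Int) (width : Int) (height : Int) (var_name : String) (out : String) : Prop := out = save_as_c_array_alt data width height var_name
instance (data : List Int) (width : Int) (height : Int) (var_name : String) (out : String) : Decidable (Spec_save_as_c_array data width height var_name out) := by unfold Spec_save_as_c_array; infer_instance

-- ===== CLAIM (what is proved, stated in full; the proofs are below) =====
def Claim_equal_save_as_c_array : Prop := ∀ (data : List Int) (width : Int) (height : Int) (var_name : String), Dom_save_as_c_array data width height var_name → Spec_save_as_c_array data width height var_name (save_as_c_array data width height var_name)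

-- ===== LEMMAS AND PROOFS =====

-- ---- A-side: the chunk loop as groupLines of the token list (proof-only) ----
def groupLines : List String → List String
  | [] => []
  | v :: vs =>
    ("    " ++ PySem.Str.join ", " (List.take 12 (v :: vs)) ++ ",") :: groupLines (List.drop 12 (v :: vs))
termination_by l => l.length
decreasing_by simp only [List.length_cons, List.length_drop]; omega

theorem foldl_app {α β : Type} (f : α → β) (l : List α) (init : List β) :
    l.foldl (fun acc i => acc ++ [f i]) init = init ++ l.map f := by
  induction l generalizing init with
  | nil => simp
  | cons x xs ih => simp [List.foldl_cons, ih]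

theorem pyRange12_nil (n : Int) (h : n ≤ 0) : PySem.List.pyRange 0 n 12 = [] := by
  rw [PySem.List.pyRange_of_pos _ _ (by norm_num)]
  simp [show ¬ (0 < n) by omega]

theorem pyRange12_cons (n : Int) (h : 0 < n) :
    PySem.List.pyRange 0 n 12 = 0 :: (PySem.List.pyRange 0 (n - 12) 12).map (· + 12) := by
  rw [PySem.List.pyRange_of_pos 0 n (by norm_num), PySem.List.pyRange_of_pos 0 (n - 12) (by norm_num)]
  by_cases h12 : 12 < n
  · rw [if_pos (show (0:Int) < n by omega), if_pos (show (0:Int) < n - 12 by omega),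
      show ((n - 0 + 12 - 1) / 12).toNat = ((n - 12 - 0 + 12 - 1) / 12).toNat + 1 by omega,
      List.range_succ_eq_map]
    simp only [List.map_cons, List.map_map]
    congr 1
  · rw [if_pos (show (0:Int) < n by omega), if_neg (show ¬ ((0:Int) < n - 12) by omega),
      show ((n - 0 + 12 - 1) / 12).toNat = 1 by omega]
    simp

theorem slice12 (xs : List Int) (i : Int) (h : 0 ≤ i) :
    PySem.List.slice xs (some i) (some (i + 12)) = (xs.drop i.toNat).take 12 := by
  obtain ⟨k, rfl⟩ := Int.eq_ofNat_of_zero_le h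
  rw [show ((k : Int) + 12) = ((k + 12 : Nat) : Int) by push_cast; ring,
    PySem.List.slice_natCast]
  congr 1; omega

theorem chunk_eq (data : List Int) :
    (PySem.List.pyRange 0 (data.length : Int) 12).map
      (fun i => "    " ++ PySem.Str.join ", " ((PySem.List.slice data (some i) (some (i + 12))).map hexTok) ++ ",")
    = groupLines (data.map hexTok) := by
  match data with
  | [] =>
    simp only [List.length_nil, Nat.cast_zero]
    rw [pyRange12_nil 0 (by omega)]; simp [groupLines]
  | x :: xs =>
    have hlen : (0 : Int) < (((x :: xs).length : Nat) : Int) := by simp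
    rw [pyRange12_cons _ hlen]
    rw [List.map_cons, List.map_map]
    have hhead : PySem.List.slice (x :: xs) (some 0) (some (0 + 12)) = (x :: xs).take 12 := by
      rw [slice12 _ _ (by omega)]; simp
    have htail : ∀ i ∈ PySem.List.pyRange 0 (((x :: xs).length : Int) - 12) 12,
        ((fun i => "    " ++ PySem.Str.join ", " ((PySem.List.slice (x :: xs) (some i) (some (i + 12))).map hexTok) ++ ",") ∘ (· + 12)) i
        = (fun i => "    " ++ PySem.Str.join ", " ((PySem.List.slice ((x :: xs).drop 12) (some i) (some (i + 12))).map hexTok) ++ ",") i := by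
      intro i hi
      have h0 : 0 ≤ i := ((PySem.List.mem_pyRange_iff_of_pos (by norm_num) i).1 hi).1
      simp only [Function.comp]
      rw [show i + 12 + 12 = (i + 12) + 12 by ring, slice12 _ _ (by omega), slice12 _ _ h0,
        List.drop_drop, show (i + 12).toNat = 12 + i.toNat by omega]
    rw [List.map_congr_left htail]
    by_cases hbig : 12 < (x :: xs).length
    · have ih := chunk_eq ((x :: xs).drop 12)
      have hcast : ((((x :: xs).drop 12).length : Nat) : Int) = ((x :: xs).length : Int) - 12 := by
        rw [List.length_drop]; omega
      rw [hcast] at ih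
      rw [ih, hhead]
      conv_rhs => rw [List.map_cons, groupLines]
      simp
    · rw [pyRange12_nil _ (by simp at hbig ⊢; omega)]
      rw [hhead]
      conv_rhs => rw [List.map_cons, groupLines]
      have hd : List.drop 12 (hexTok x :: List.map hexTok xs) = [] :=
        List.drop_eq_nil_of_le (by simp at hbig ⊢; omega)
      rw [hd]
      simp [groupLines, List.map_take]
termination_by data.length
decreasing_by simp

-- ---- Str.join bridges ----
theorem str_join_singleton (s a : String) : PySem.Str.join s [a] = a := by
  apply String.toList_inj.mp
  simp [PySem.Str.join, PySem.Chars.join_singleton]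

theorem str_join_cons_cons (s a b : String) (l : List String) :
    PySem.Str.join s (a :: b :: l) = a ++ s ++ PySem.Str.join s (b :: l) := by
  apply String.toList_inj.mp
  simp [PySem.Str.join, PySem.Chars.join_cons_cons]

theorem str_join_snoc (l : List String) (a z : String) :
    PySem.Str.join "\n" ((a :: l) ++ [z]) = PySem.Str.join "\n" (a :: l) ++ "\n" ++ z := by
  induction l generalizing a with
  | nil => rw [List.cons_append, List.nil_append, str_join_cons_cons, str_join_singleton, str_join_singleton]
  | cons b bs ih =>
    rw [show (a :: b :: bs) ++ [z] = a :: (b :: (bs ++ [z])) by simp, str_join_cons_cons,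
      show b :: (bs ++ [z]) = (b :: bs) ++ [z] by simp, ih, str_join_cons_cons]
    simp [String.append_assoc]

-- ---- B-side: the streaming fold as a pure suffix function ----
def pieceStr (j : Nat) : String :=
  if j == 0 then "\n    " else if j % 12 == 0 then ",\n    " else ", "

def piecesFrom (j : Nat) : List Int → String
  | [] => ""
  | v :: vs => pieceStr j ++ hexTok v ++ piecesFrom (j + 1) vs

def piecesI : List (Int × Int) → String
  | [] => ""
  | iv :: r =>
    (if iv.1 == 0 then "\n    " else if PySem.Int.mod iv.1 12 == 0 then ",\n    " else ", ")
      ++ hexTok iv.2 ++ piecesI r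

def commaPieces : List Int → String
  | [] => ""
  | v :: vs => ", " ++ hexTok v ++ commaPieces vs

theorem foldl_pieces (l : List (Int × Int)) (init : String) :
    l.foldl (fun out iv =>
      (if iv.1 == 0 then out ++ "\n    "
       else if PySem.Int.mod iv.1 12 == 0 then out ++ ",\n    "
       else out ++ ", ") ++ hexTok iv.2) init = init ++ piecesI l := by
  induction l generalizing init with
  | nil => simp [piecesI]
  | cons iv r ih =>
    rw [List.foldl_cons, ih, piecesI]
    split_ifs <;> simp [String.append_assoc]

theorem piecesI_enumerate (data : List Int) (j : Nat) :
    piecesI (PySem.List.enumerate data (j : Int)) = piecesFrom j data := by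
  induction data generalizing j with
  | nil => simp [PySem.List.enumerate_nil, piecesI, piecesFrom]
  | cons v vs ih =>
    rw [PySem.List.enumerate_cons, piecesI, piecesFrom, pieceStr,
      show ((j : Int) + 1) = ((j + 1 : Nat) : Int) by push_cast; ring, ih]
    have h1 : ((j : Int) == 0) = (j == 0) := by
      by_cases h : j = 0 <;> simp [h]
    have h2 : (PySem.Int.mod (j : Int) 12 == 0) = (j % 12 == 0) := by
      rw [show (12 : Int) = ((12 : Nat) : Int) by norm_num, PySem.Int.mod_natCast]
      by_cases h : j % 12 = 0
      · simp [h]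
      · simp [h]; omega
    rw [h1, h2]

theorem piecesFrom_run (c : List Int) (r : List Int) (j : Nat) (h1 : 1 ≤ j) (h2 : j + c.length ≤ 12) :
    piecesFrom j (c ++ r) = commaPieces c ++ piecesFrom (j + c.length) r := by
  induction c generalizing j with
  | nil => simp [commaPieces]
  | cons v vs ih =>
    simp only [List.length_cons] at h2
    have hj0 : (j == 0) = false := by simp; omega
    have hjm : (j % 12 == 0) = false := by simp; omega
    rw [List.cons_append, piecesFrom, commaPieces, pieceStr, hj0, hjm]
    simp only [Bool.false_eq_true, if_false]
    rw [ih (j + 1) (by omega) (by omega)]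
    simp only [List.length_cons, String.append_assoc]
    rw [show j + (vs.length + 1) = j + 1 + vs.length by omega]

theorem piecesFrom_shift (l : List Int) (j : Nat) (h : 1 ≤ j) :
    piecesFrom (j + 12) l = piecesFrom j l := by
  induction l generalizing j with
  | nil => rfl
  | cons v vs ih =>
    have hps : pieceStr (j + 12) = pieceStr j := by
      simp only [pieceStr, show (j + 12) % 12 = j % 12 by omega,
        show (j + 12 == 0) = false by simp,
        show (j == 0) = false by simp; omega]
    rw [piecesFrom, piecesFrom, show j + 12 + 1 = j + 1 + 12 by omega, ih (j + 1) (by omega), hps]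

theorem piecesFrom_twelve (v : Int) (l : List Int) :
    piecesFrom 12 (v :: l) = "," ++ piecesFrom 0 (v :: l) := by
  rw [piecesFrom, piecesFrom, show (12 : Nat) + 1 = 1 + 12 by omega, piecesFrom_shift l 1 (by omega)]
  rw [show pieceStr 12 = "," ++ pieceStr 0 by decide]
  simp [String.append_assoc]

theorem join_comma (t : String) (c : List Int) :
    t ++ commaPieces c = PySem.Str.join ", " (t :: c.map hexTok) := by
  induction c generalizing t with
  | nil => simp only [commaPieces, List.map_nil, String.append_empty, str_join_singleton]
  | cons v vs ih =>
    rw [List.map_cons, str_join_cons_cons, ← ih (hexTok v), commaPieces]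
    simp [String.append_assoc]

theorem pieces_main (data : List Int) (hne : data ≠ []) :
    piecesFrom 0 data ++ "," = "\n" ++ PySem.Str.join "\n" (groupLines (data.map hexTok)) := by
  match data with
  | [] => exact absurd rfl hne
  | v :: rest =>
    have hsplit : rest = rest.take 11 ++ rest.drop 11 := (List.take_append_drop 11 rest).symm
    have hlen11 : (rest.take 11).length ≤ 11 := by simp
    rw [piecesFrom, show pieceStr 0 = "\n" ++ "    " by decide]
    conv_lhs => rw [hsplit]
    rw [piecesFrom_run _ _ 1 (by omega) (by omega)]
    have hgl : groupLines ((v :: rest).map hexTok)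
        = ("    " ++ PySem.Str.join ", " (List.take 12 ((v :: rest).map hexTok)) ++ ",")
          :: groupLines (List.drop 12 ((v :: rest).map hexTok)) := by
      rw [List.map_cons, groupLines]
    have htake : List.take 12 ((v :: rest).map hexTok) = hexTok v :: (rest.take 11).map hexTok := by
      simp [List.map_take]
    have hdrop : List.drop 12 ((v :: rest).map hexTok) = (rest.drop 11).map hexTok := by
      simp [List.map_drop]
    by_cases hr : rest.drop 11 = []
    · rw [hr, piecesFrom]
      rw [hgl, hdrop, hr]
      simp only [List.map_nil]
      rw [groupLines, str_join_singleton, htake]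
      rw [String.append_empty, ← join_comma]
      simp only [String.append_assoc]
    · obtain ⟨v', r', hr'⟩ : ∃ v' r', rest.drop 11 = v' :: r' := by
        cases h : rest.drop 11 with
        | nil => exact absurd h hr
        | cons a b => exact ⟨a, b, rfl⟩
      have hc11 : (rest.take 11).length = 11 := by
        have : 11 < rest.length := by
          by_contra h
          exact hr (List.drop_eq_nil_of_le (by omega))
        simp [List.length_take]; omega
      rw [hc11, hr', piecesFrom_twelve]
      have ih := pieces_main (v' :: r') (by simp)
      rw [hgl, hdrop, hr']
      have hgl2 : ∃ g gs, groupLines ((v' :: r').map hexTok) = g :: gs := by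
        rw [List.map_cons, groupLines]; exact ⟨_, _, rfl⟩
      obtain ⟨g, gs, hg⟩ := hgl2
      rw [hg, str_join_cons_cons]
      rw [show ("    " ++ PySem.Str.join ", " (List.take 12 ((v :: rest).map hexTok)) ++ ",") ++ "\n" ++ PySem.Str.join "\n" (g :: gs)
        = "    " ++ PySem.Str.join ", " (List.take 12 ((v :: rest).map hexTok)) ++ "," ++ ("\n" ++ PySem.Str.join "\n" (g :: gs)) by simp only [String.append_assoc]]
      rw [← hg, ← ih, htake, ← join_comma]
      simp only [String.append_assoc]
termination_by data.length
decreasing_by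
  simp only [List.length_cons]
  have h2 : (List.drop 11 rest).length = rest.length - 11 := List.length_drop
  rw [hr'] at h2
  simp at h2
  omega

-- ===== VERDICT (by name: the statement is the Claim_ definition above) =====
theorem save_as_c_array_spec : Claim_equal_save_as_c_array := by
  intro data width height var_name _
  unfold Spec_save_as_c_array save_as_c_array save_as_c_array_alt
  simp only [foldl_app, foldl_pieces]
  rw [chunk_eq, show (0 : Int) = ((0 : Nat) : Int) by norm_num, piecesI_enumerate]
  cases data with
  | nil =>
    rw [List.isEmpty_nil, if_pos rfl]
    simp only [List.map_nil, groupLines, piecesFrom, List.singleton_append]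
    rw [str_join_cons_cons, str_join_singleton, String.append_empty, String.append_assoc,
      show ("\n" : String) ++ "};" = "\n};" by decide]
  | cons v rest =>
    rw [show (v :: rest).isEmpty = false by rfl, if_neg (by simp)]
    obtain ⟨g, gs, hg⟩ : ∃ g gs, groupLines ((v :: rest).map hexTok) = g :: gs := by
      rw [List.map_cons, groupLines]; exact ⟨_, _, rfl⟩
    have hm := pieces_main (v :: rest) (by simp)
    rw [hg] at hm
    rw [List.singleton_append, hg, str_join_snoc, str_join_cons_cons,
      show ("\n};" : String) = "\n" ++ "};" by decide]
    simp only [String.append_assoc]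
    rw [show piecesFrom 0 (v :: rest) ++ ("," ++ ("\n" ++ "};")) = (piecesFrom 0 (v :: rest) ++ ",") ++ ("\n" ++ "};") by rw [← String.append_assoc], hm]
    simp only [String.append_assoc]
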